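-- pv_equiv track=rewrite | github.com/monkeylanguage/elects | helpers.py | get_village_data_dict
-- ===== SOURCE A (Python) =====
-- from typing import List, Tuple, Dict
--
-- def get_village_data_dict(village_data: Dict, village_id: str) -> Dict:
-- 	data = []
-- 	found = False
-- 	for row in village_data:
-- 		if row.get("CIS_OBEC", "") != "":
-- 			if row.get("CIS_OBEC", "") == village_id:
-- 				found = True
-- 			else:
-- 				found = False
-- 		if found:
-- 			data.append(row)
-- 	return data
-- ===== SOURCE B (Python) =====
-- def get_village_data_dict(village_data, village_id):
--     groups = {}
--     current = None
--     for row in village_data: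
--         marker = row.get("CIS_OBEC", "")
--         if marker != "":
--             current = marker
--         if current is not None:
--             groups.setdefault(current, []).append(row)
--     return groups.get(village_id, [])
-- ===== Notes on version B (the rewrite author's own statement) =====
-- stated objective: alternative
-- what changed: B replaces A's boolean found-flag with a one-pass grouping: it builds a dict mapping each village marker to all its rows (tracking the current marker) and then selects village_id's group by a single lookup.
import Mathlib
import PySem

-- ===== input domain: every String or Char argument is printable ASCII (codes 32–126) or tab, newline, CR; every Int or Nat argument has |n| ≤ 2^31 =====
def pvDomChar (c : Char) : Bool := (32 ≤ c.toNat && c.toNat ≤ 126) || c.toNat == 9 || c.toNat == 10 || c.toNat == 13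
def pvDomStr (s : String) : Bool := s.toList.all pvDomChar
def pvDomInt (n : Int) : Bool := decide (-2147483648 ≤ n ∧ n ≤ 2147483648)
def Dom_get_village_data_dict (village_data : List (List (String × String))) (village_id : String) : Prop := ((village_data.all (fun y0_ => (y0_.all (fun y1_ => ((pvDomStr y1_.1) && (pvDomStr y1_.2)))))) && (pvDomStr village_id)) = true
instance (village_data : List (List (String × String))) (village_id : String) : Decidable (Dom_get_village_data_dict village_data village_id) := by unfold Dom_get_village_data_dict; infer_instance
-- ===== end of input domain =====

-- B replaces A's boolean found-flag with a one-pass grouping dict keyed by village marker, selected by a final lookup; alternative decomposition, same cost.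


-- ===== PORT A =====
def get_village_data_dict (village_data : List (List (String × String))) (village_id : String) : List (List (String × String)) :=
  (village_data.foldl
    (fun (st : List (List (String × String)) × Bool) row =>
      let found :=
        if (PySem.Dict.mk row).getD "CIS_OBEC" "" ≠ "" then
          (if (PySem.Dict.mk row).getD "CIS_OBEC" "" = village_id then true else false)
        else st.2
      (if found then st.1 ++ [row] else st.1, found))
    ([], false)).1

-- ===== PORT B =====
def get_village_data_dict_alt (village_data : List (List (String × String))) (village_id : String) : List (List (String × String)) :=
  let st := village_data.foldl
    (fun (st : PySem.Dict String (List (List (String × String))) × Option String) row =>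
      let marker := (PySem.Dict.mk row).getD "CIS_OBEC" ""
      let current := if marker ≠ "" then some marker else st.2
      match current with
      | some c => (st.1.insert c (st.1.getD c [] ++ [row]), current)
      | none => (st.1, current))
    (PySem.Dict.empty, none)
  st.1.getD village_id []

-- ===== PRECONDITION & SPEC =====
def Spec_get_village_data_dict (village_data : List (List (String × String))) (village_id : String) (out : List (List (String × String))) : Prop := out = get_village_data_dict_alt village_data village_id
instance (village_data : List (List (String × String))) (village_id : String) (out : List (List (String × String))) : Decidable (Spec_get_village_data_dict village_data village_id out) := by unfold Spec_get_village_data_dict; infer_instance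

-- ===== CLAIM (what is proved, stated in full; the proofs are below) =====
def Claim_equal_get_village_data_dict : Prop := ∀ (village_data : List (List (String × String))) (village_id : String), Dom_get_village_data_dict village_data village_id → Spec_get_village_data_dict village_data village_id (get_village_data_dict village_data village_id)

-- ===== LEMMAS AND PROOFS =====

-- Loop invariant: A's accumulated data equals B's group for village_id, and A's flag
-- says exactly that B's current marker is village_id.
theorem gvdd_loop (village_id : String) (l : List (List (String × String)))
    (data : List (List (String × String))) (found : Bool)
    (g : PySem.Dict String (List (List (String × String)))) (cur : Option String)
    (h1 : found = true ↔ cur = some village_id)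
    (h2 : data = g.getD village_id []) :
    (l.foldl
      (fun (st : List (List (String × String)) × Bool) row =>
        let found :=
          if (PySem.Dict.mk row).getD "CIS_OBEC" "" ≠ "" then
            (if (PySem.Dict.mk row).getD "CIS_OBEC" "" = village_id then true else false)
          else st.2
        (if found then st.1 ++ [row] else st.1, found))
      (data, found)).1
    = (l.foldl
      (fun (st : PySem.Dict String (List (List (String × String))) × Option String) row =>
        let marker := (PySem.Dict.mk row).getD "CIS_OBEC" ""
        let current := if marker ≠ "" then some marker else st.2
        match current with
        | some c => (st.1.insert c (st.1.getD c [] ++ [row]), current)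
        | none => (st.1, current))
      (g, cur)).1.getD village_id [] := by
  induction l generalizing data found g cur with
  | nil => simpa using h2
  | cons row rest ih =>
    simp only [List.foldl_cons]
    set m := (PySem.Dict.mk row).getD "CIS_OBEC" "" with hm
    by_cases hme : m = ""
    · -- marker empty: both states governed by old cur/found
      simp only [hme, ne_eq, not_true_eq_false, if_false]
      cases cur with
      | none =>
        have hf : found = false := by
          cases found
          · rfl
          · exact absurd (h1.mp rfl) (by simp)
        subst hf
        simpa using ih data false g none h1 h2
      | some c =>
        by_cases hc : c = village_id
        · subst hc
          have hf : found = true := h1.mpr rfl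
          subst hf
          refine ih _ _ _ _ h1 ?_
          simp [h2]
        · have hf : found = false := by
            cases found
            · rfl
            · exact absurd (h1.mp rfl) (by simp [hc])
          subst hf
          refine ih _ _ _ _ h1 ?_
          simp [PySem.Dict.getD_insert, Ne.symm hc, h2]
    · -- marker non-empty: new cur = some m, new found = (m = village_id)
      simp only [ne_eq, hme, not_false_iff, if_true]
      by_cases hmv : m = village_id
      · subst hmv
        refine ih _ _ _ _ (by simp) ?_
        simp [h2]
      · simp only [if_neg hmv]
        refine ih _ _ _ _ (by simp [hmv]) ?_
        simp [PySem.Dict.getD_insert, Ne.symm hmv, h2]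

-- ===== VERDICT (by name: the statement is the Claim_ definition above) =====
theorem get_village_data_dict_spec : Claim_equal_get_village_data_dict := by
  intro village_data village_id _
  unfold Spec_get_village_data_dict get_village_data_dict get_village_data_dict_alt
  exact gvdd_loop village_id village_data [] false PySem.Dict.empty none (by simp) (by simp)
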